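-- pv_equiv track=rewrite | github.com/oliverboyd/Countdown | pages/countdown.py | min_only
-- ===== SOURCE A (Python) =====
-- def min_arrays(array):
--     # returns an array containing the indices of the smallest arrays in an array of arrays
--     L = len(array)
--     mins=[0]
--     for i in range(1,L):
--         if len(array[mins[0]]) > len(array[i]):
--             mins=[i]
--         elif len(array[mins[0]]) == len(array[i]):
--             mins.append(i)
--     return mins
--
-- def min_only(array):
--     # removes all non-minimum arrays from an array of arrays
--     if array == "Impossible":
--         return "Impossible"
--     elif array == "Trivial":
--         return "Trivial"
--     else:
--         array2=[]
--         for i in min_arrays(array):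
--             array2.append(array[i])
--         return array2
-- ===== SOURCE B (Python) =====
-- def min_only(array):
--     # removes all non-minimum arrays from an array of arrays
--     if array == "Impossible":
--         return "Impossible"
--     elif array == "Trivial":
--         return "Trivial"
--     else:
--         best = len(array[0])
--         for x in array[1:]:
--             if len(x) < best:
--                 best = len(x)
--         return [x for x in array if len(x) == best]
-- ===== Notes on version B (the rewrite author's own statement) =====
-- stated objective: simpler
-- what changed: Replaced the candidate-index list that resets/extends while scanning (then a second loop materialising array[i]) with a scalar minimum-length pass followed by a direct filter comprehension over the values.
import Mathlib
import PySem

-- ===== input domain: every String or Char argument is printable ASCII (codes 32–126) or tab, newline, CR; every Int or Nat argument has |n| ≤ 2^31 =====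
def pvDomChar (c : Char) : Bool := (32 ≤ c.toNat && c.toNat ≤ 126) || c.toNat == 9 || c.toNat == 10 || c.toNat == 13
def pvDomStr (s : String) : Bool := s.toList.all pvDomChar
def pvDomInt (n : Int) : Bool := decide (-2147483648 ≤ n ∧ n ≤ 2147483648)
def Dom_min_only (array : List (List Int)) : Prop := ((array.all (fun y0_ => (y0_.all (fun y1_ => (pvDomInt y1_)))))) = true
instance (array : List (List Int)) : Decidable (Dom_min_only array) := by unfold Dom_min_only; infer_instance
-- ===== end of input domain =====

-- B replaces A's candidate-index list (reset/extend while scanning, then a second indexing loop)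
-- by a scalar minimum-length pass and a filter over the values (objective: simpler).
-- Under the type convention the inputs are lists, so Python's `array == "Impossible"` /
-- `array == "Trivial"` guards are always False and are dropped from both ports.

-- ===== PORT A =====
-- `array[i]`: all indices reached under Pre_ are in range, so pyGetD's default is never used.
def pvStepA (array : List (List Int)) (mins : List Int) (i : Int) : List Int :=
  if (PySem.List.pyGetD array (mins.headD 0) []).length > (PySem.List.pyGetD array i []).length then [i]
  else if (PySem.List.pyGetD array (mins.headD 0) []).length = (PySem.List.pyGetD array i []).length then mins ++ [i]
  else mins

def min_arrays (array : List (List Int)) : List Int :=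
  (PySem.List.pyRange 1 (array.length : Int) 1).foldl (pvStepA array) [0]

def min_only (array : List (List Int)) : List (List Int) :=
  (min_arrays array).foldl (fun array2 i => array2 ++ [PySem.List.pyGetD array i []]) []

-- ===== PORT B =====
-- `array[0]` is in range under Pre_ (array ≠ []), ported as headD; `array[1:]` = drop 1.
def min_only_alt (array : List (List Int)) : List (List Int) :=
  let best := (array.drop 1).foldl (fun b x => if x.length < b then x.length else b) (array.headD []).length
  array.filter (fun x => x.length == best)

-- ===== PRECONDITION & SPEC =====
-- Pre_ excludes only the empty list, on which Python A raises IndexError (array[mins[0]] with mins=[0]).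
def Pre_min_only (array : List (List Int)) : Prop := array ≠ []
instance (array : List (List Int)) : Decidable (Pre_min_only array) := by unfold Pre_min_only; infer_instance
def pvWitness_min_only : List (List Int) := [[1, 2], [3]]

def Spec_min_only (array : List (List Int)) (out : List (List Int)) : Prop := out = min_only_alt array
instance (array : List (List Int)) (out : List (List Int)) : Decidable (Spec_min_only array out) := by unfold Spec_min_only; infer_instance

-- ===== CLAIM (what is proved, stated in full; the proofs are below) =====
def Claim_equal_min_only : Prop := ∀ (array : List (List Int)), Dom_min_only array → Pre_min_only array → Spec_min_only array (min_only array)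

-- ===== LEMMAS AND PROOFS =====

-- B's running minimum over a prefix: `bminP h t j` is the minimum length among (h::t).take j (for 1 ≤ j).
def bminP (h : List Int) (t : List (List Int)) (j : Nat) : Nat :=
  (t.take (j - 1)).foldl (fun b x => if x.length < b then x.length else b) h.length

theorem foldl_min_bound (l : List (List Int)) (b : Nat) :
    l.foldl (fun b x => if x.length < b then x.length else b) b ≤ b ∧
    ∀ x ∈ l, l.foldl (fun b x => if x.length < b then x.length else b) b ≤ x.length := by
  induction l generalizing b with
  | nil => simp
  | cons y l ih =>
    simp only [List.foldl_cons, List.mem_cons]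
    constructor
    · exact le_trans (ih _).1 (by split <;> omega)
    · rintro x (rfl | hx)
      · exact le_trans (ih _).1 (by split <;> omega)
      · exact (ih _).2 x hx

theorem bminP_le (h : List Int) (t : List (List Int)) (j : Nat) (hj : 1 ≤ j) :
    ∀ x ∈ (h :: t).take j, bminP h t j ≤ x.length := by
  intro x hx
  obtain ⟨k, hk, rfl⟩ : x = h ∨ x ∈ t.take (j - 1) := by
    obtain ⟨j', rfl⟩ : ∃ j', j = j' + 1 := ⟨j - 1, by omega⟩
    simpa using hx
  case inl => exact (foldl_min_bound _ _).1
  case inr hx' => exact (foldl_min_bound _ _).2 x hx'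

theorem bminP_succ (h : List Int) (t : List (List Int)) (j : Nat) (hj : 1 ≤ j)
    (hjL : j < t.length + 1) :
    bminP h t (j + 1) =
      if ((h :: t)[j]'(by simpa using hjL)).length < bminP h t j
      then ((h :: t)[j]'(by simpa using hjL)).length else bminP h t j := by
  have hj1 : j - 1 < t.length := by omega
  have htake : t.take (j + 1 - 1) = t.take (j - 1) ++ [t[j - 1]] := by
    have : j + 1 - 1 = (j - 1) + 1 := by omega
    rw [this, List.take_succ, List.getElem?_eq_getElem hj1]
    simp
  have hElem : (h :: t)[j]'(by simpa using hjL) = t[j - 1] := by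
    obtain ⟨j', rfl⟩ : ∃ j', j = j' + 1 := ⟨j - 1, by omega⟩
    simp
  rw [bminP, htake, List.foldl_append, hElem]
  rfl

theorem take_cons_succ (h : List Int) (t : List (List Int)) (j : Nat)
    (hjL : j < t.length + 1) :
    (h :: t).take (j + 1) = (h :: t).take j ++ [(h :: t)[j]'(by simpa using hjL)] := by
  rw [List.take_succ, List.getElem?_eq_getElem (by simpa using hjL)]
  simp

-- The loop invariant of A's min_arrays scan, pushed through the remaining indices j, j+1, …, j+n-1.
theorem loopA (h : List Int) (t : List (List Int)) :
    ∀ (n j : Nat) (mins : List Int), 1 ≤ j → j + n = t.length + 1 →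
    mins ≠ [] →
    (PySem.List.pyGetD (h :: t) (mins.headD 0) []).length = bminP h t j →
    mins.map (fun i => PySem.List.pyGetD (h :: t) i []) =
      ((h :: t).take j).filter (fun x => x.length == bminP h t j) →
    (((List.range n).map (fun k => ((j + k : Nat) : Int))).foldl (pvStepA (h :: t)) mins).map
        (fun i => PySem.List.pyGetD (h :: t) i []) =
      (h :: t).filter (fun x => x.length == bminP h t (t.length + 1)) := by
  intro n
  induction n with
  | zero =>
    intro j mins hj hjn hne hhead hmap
    have : j = t.length + 1 := by omega
    subst this
    simpa using hmap
  | succ n ih =>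
    intro j mins hj hjn hne hhead hmap
    have hjL : j < t.length + 1 := by omega
    have hjlen : j < (h :: t).length := by simpa using hjL
    set e := (h :: t)[j]'hjlen with he
    have hgetj : PySem.List.pyGetD (h :: t) ((j : Nat) : Int) [] = e := by
      rw [PySem.List.pyGetD_natCast, List.getD_eq_getElem?_getD, List.getElem?_eq_getElem hjlen]
      rfl
    have hlist : (List.range (n + 1)).map (fun k => ((j + k : Nat) : Int)) =
        ((j : Nat) : Int) :: (List.range n).map (fun k => (((j + 1) + k : Nat) : Int)) := by
      rw [List.range_succ_eq_map, List.map_cons, List.map_map]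
      refine congrArg₂ _ (by simp) ?_
      apply List.map_congr_left
      intro k _
      simp only [Function.comp_apply]
      omega
    rw [hlist, List.foldl_cons]
    have hbsucc := bminP_succ h t j hj hjL
    rw [← he] at hbsucc
    have hstep : pvStepA (h :: t) mins ((j : Nat) : Int) =
        if bminP h t j > e.length then [((j : Nat) : Int)]
        else if bminP h t j = e.length then mins ++ [((j : Nat) : Int)]
        else mins := by
      rw [pvStepA, hgetj, hhead]
    have htakes := take_cons_succ h t j hjL
    rw [← he] at htakes
    by_cases h1 : e.length < bminP h t j
    · -- strictly smaller: reset candidates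
      have hb1 : bminP h t (j + 1) = e.length := by rw [hbsucc]; simp [h1]
      rw [hstep, if_pos (by omega)]
      apply ih (j + 1) _ (by omega) (by omega) (by simp)
        (by rw [hb1]; simp only [List.headD_cons]; rw [hgetj])
      rw [htakes, List.filter_append, hb1]
      have hprev : ((h :: t).take j).filter (fun x => x.length == e.length) = [] := by
        rw [List.filter_eq_nil_iff]
        intro x hx
        have := bminP_le h t j hj x hx
        simp only [beq_iff_eq]
        omega
      rw [hprev]
      simp [hgetj]
    · by_cases h2 : bminP h t j = e.length
      · -- tie: extend candidates
        have hb1 : bminP h t (j + 1) = bminP h t j := by rw [hbsucc]; simp [h1]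
        rw [hstep, if_neg (by omega), if_pos h2]
        apply ih (j + 1) _ (by omega) (by omega) (by simp [hne])
        · cases mins with
          | nil => exact absurd rfl hne
          | cons a l => simpa [hb1] using hhead
        · rw [htakes, List.filter_append, hb1, List.map_append, hmap]
          simp [hgetj, h2.symm]
      · -- strictly larger: unchanged
        have h3 : bminP h t j < e.length := by omega
        have hb1 : bminP h t (j + 1) = bminP h t j := by rw [hbsucc]; simp [h1]
        rw [hstep, if_neg (by omega), if_neg h2]
        apply ih (j + 1) _ (by omega) (by omega) hne (by rw [hb1]; exact hhead)
        rw [htakes, List.filter_append, hb1, hmap]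
        have hne2 : (e.length == bminP h t j) = false := by
          simp only [beq_eq_false_iff_ne]; omega
        simp [hne2]

theorem foldl_append_map (f : Int → List Int) (l : List Int) (acc : List (List Int)) :
    l.foldl (fun array2 i => array2 ++ [f i]) acc = acc ++ l.map f := by
  induction l generalizing acc with
  | nil => simp
  | cons a l ih => simp [ih]

theorem pyRange_one_eq (L : Nat) :
    PySem.List.pyRange 1 ((L + 1 : Nat) : Int) 1 =
      (List.range L).map (fun k => ((1 + k : Nat) : Int)) := by
  rw [PySem.List.pyRange_one]
  have : (((L + 1 : Nat) : Int) - 1).toNat = L := by omega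
  rw [this]
  apply List.map_congr_left
  intro k _
  push_cast
  ring

-- ===== VERDICT (by name: the statement is the Claim_ definition above) =====
theorem min_only_spec : Claim_equal_min_only := by
  intro array _ hpre
  cases array with
  | nil => exact absurd rfl hpre
  | cons h t =>
    unfold Spec_min_only min_only min_arrays min_only_alt
    rw [foldl_append_map]
    have hL : ((h :: t).length : Int) = ((t.length + 1 : Nat) : Int) := by simp
    rw [hL, pyRange_one_eq]
    have hbest : ((h :: t).drop 1).foldl (fun b x => if x.length < b then x.length else b)
        ((h :: t).headD []).length = bminP h t (t.length + 1) := by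
      simp [bminP]
    rw [List.nil_append, hbest]
    exact loopA h t t.length 1 [0] (by omega) (by omega) (by simp)
      (by simp [bminP, PySem.List.pyGetD_zero])
      (by simp [bminP, PySem.List.pyGetD_zero])
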